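-- pv_equiv track=rewrite | github.com/Cielyuy/practice | 0804/reduce.py | split1
-- ===== SOURCE A (Python) =====
-- def split1(str1):
--     s1=[]
--     s2=[]
--     isFlag = True
--     for i in str1:
--         if i == '.':
--             isFlag = False
--
--         if isFlag:
--             s1.append(i)
--
--         else:
--             if i != '.':
--                 s2.append(i)
--     return s1,s2
-- ===== SOURCE B (Python) =====
-- def split1(str1):
--     prefix, _, rest = str1.partition('.')
--     return list(prefix), [c for c in rest if c != '.']
-- ===== Notes on version B (the rewrite author's own statement) =====
-- stated objective: simpler
-- what changed: Replaces the flag-driven per-character loop with str.partition('.') followed by a dot-filter on the tail half.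
import Mathlib
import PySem

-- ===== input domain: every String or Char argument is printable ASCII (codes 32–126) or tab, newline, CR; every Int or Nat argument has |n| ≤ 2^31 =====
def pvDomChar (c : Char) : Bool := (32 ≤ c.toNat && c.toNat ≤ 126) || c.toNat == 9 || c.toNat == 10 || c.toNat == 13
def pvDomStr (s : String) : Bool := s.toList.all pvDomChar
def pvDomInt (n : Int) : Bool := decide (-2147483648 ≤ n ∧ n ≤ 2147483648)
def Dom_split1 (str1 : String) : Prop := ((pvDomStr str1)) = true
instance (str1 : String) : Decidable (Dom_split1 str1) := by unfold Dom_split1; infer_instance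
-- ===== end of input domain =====

-- B replaces A's flag-driven single-character loop by partition-at-first-dot then
-- filtering dots out of the tail half (objective: simpler).

-- ===== PORT A =====
-- A's for-loop over the characters, carrying (s1, s2, isFlag); appended chars are
-- length-1 strings.
def split1Loop : List Char → List String × List String × Bool → List String × List String × Bool
  | [], st => st
  | i :: rest, (s1, s2, isFlag) =>
    let isFlag := if i == '.' then false else isFlag
    if isFlag then split1Loop rest (s1 ++ [i.toString], s2, isFlag)
    else if i != '.' then split1Loop rest (s1, s2 ++ [i.toString], isFlag)
    else split1Loop rest (s1, s2, isFlag)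

def split1 (str1 : String) : List String × List String :=
  let r := split1Loop str1.toList ([], [], true)
  (r.1, r.2.1)

-- ===== PORT B =====
-- Source B: prefix, _, rest = str1.partition('.'); return list(prefix), [c for c in rest if c != '.']
-- partition('.') ported as takeWhile / (dropWhile …).tail on the character list.
def split1_alt (str1 : String) : List String × List String :=
  let l := str1.toList
  let pre := l.takeWhile (fun c => c != '.')
  let rest := (l.dropWhile (fun c => c != '.')).tail
  (pre.map Char.toString, (rest.filter (fun c => c != '.')).map Char.toString)

-- ===== PRECONDITION & SPEC =====
def Spec_split1 (str1 : String) (out : List String × List String) : Prop := out = split1_alt str1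
instance (str1 : String) (out : List String × List String) : Decidable (Spec_split1 str1 out) := by unfold Spec_split1; infer_instance

-- ===== CLAIM (what is proved, stated in full; the proofs are below) =====
def Claim_equal_split1 : Prop := ∀ (str1 : String), Dom_split1 str1 → Spec_split1 str1 (split1 str1)

-- ===== LEMMAS AND PROOFS =====
theorem split1Loop_false (l : List Char) (s1 s2 : List String) :
    split1Loop l (s1, s2, false) =
      (s1, s2 ++ (l.filter (fun c => c != '.')).map Char.toString, false) := by
  induction l generalizing s2 with
  | nil => simp [split1Loop]
  | cons i rest ih =>
    by_cases h : i = '.'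
    · subst h; simp [split1Loop, ih]
    · simp [split1Loop, h, ih]

theorem split1Loop_true (l : List Char) (s1 s2 : List String) :
    split1Loop l (s1, s2, true) =
      (s1 ++ (l.takeWhile (fun c => c != '.')).map Char.toString,
       s2 ++ (((l.dropWhile (fun c => c != '.')).tail).filter (fun c => c != '.')).map Char.toString,
       !(l.contains '.')) := by
  induction l generalizing s1 with
  | nil => simp [split1Loop]
  | cons i rest ih =>
    by_cases h : i = '.'
    · subst h
      simp [split1Loop, split1Loop_false, List.takeWhile, List.dropWhile]
    · have hb : (i != '.') = true := by simp [h]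
      simp [split1Loop, h, ih, List.takeWhile, List.dropWhile, hb]
      exact fun _ he => h he.symm

-- ===== VERDICT (by name: the statement is the Claim_ definition above) =====
theorem split1_spec : Claim_equal_split1 := by
  intro str1 _
  unfold Spec_split1 split1 split1_alt
  rw [split1Loop_true]
  simp
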